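-- pv_equiv track=rewrite | github.com/marbatis/csca5028-webapp-echo | src/app.py | summarize_inventory
-- ===== SOURCE A (Python) =====
-- from typing import Any
--
-- def summarize_inventory(rows: list[dict[str, Any]]) -> dict[str, Any]:
--     if not rows:
--         return {
--             "total_records": 0,
--             "distinct_years": 0,
--             "year_start": None,
--             "year_end": None,
--         }
--     years = sorted({int(row["model_year"]) for row in rows})
--     return {
--         "total_records": len(rows),
--         "distinct_years": len(years),
--         "year_start": years[0],
--         "year_end": years[-1],
--     }
-- ===== SOURCE B (Python) =====
-- def summarize_inventory(rows):
--     if not rows: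
--         return {
--             "total_records": 0,
--             "distinct_years": 0,
--             "year_start": None,
--             "year_end": None,
--         }
--     seen = set()
--     mn = None
--     mx = None
--     for row in rows:
--         y = int(row["model_year"])
--         seen.add(y)
--         if mn is None or y < mn:
--             mn = y
--         if mx is None or y > mx:
--             mx = y
--     return {
--         "total_records": len(rows),
--         "distinct_years": len(seen),
--         "year_start": mn,
--         "year_end": mx,
--     }
-- ===== Notes on version B (the rewrite author's own statement) =====
-- stated objective: alternative
-- what changed: Replaces build-a-set-then-sort-then-index with a single pass over the rows that maintains the distinct-year set and running min/max accumulators, so no sort and no indexing are needed.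
import Mathlib
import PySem

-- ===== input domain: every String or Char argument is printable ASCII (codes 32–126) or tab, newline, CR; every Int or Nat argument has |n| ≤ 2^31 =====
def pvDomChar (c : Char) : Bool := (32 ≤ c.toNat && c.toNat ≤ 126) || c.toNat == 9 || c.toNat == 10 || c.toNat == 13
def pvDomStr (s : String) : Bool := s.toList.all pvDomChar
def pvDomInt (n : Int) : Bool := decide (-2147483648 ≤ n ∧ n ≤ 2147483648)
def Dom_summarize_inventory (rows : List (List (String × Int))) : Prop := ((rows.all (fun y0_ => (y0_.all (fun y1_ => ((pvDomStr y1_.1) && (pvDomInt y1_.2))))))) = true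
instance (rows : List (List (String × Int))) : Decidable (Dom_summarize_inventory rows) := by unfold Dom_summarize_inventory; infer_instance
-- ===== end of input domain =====

-- B replaces A's build-set-then-sort-then-index with a single pass over the rows that
-- maintains the distinct-year set and running min/max (no sort); equal return value proved on Pre_.


-- ===== PORT A =====
-- row["model_year"] (int() is the identity on int values); total via getD, Pre_ guarantees the key is present
def yearOf (row : List (String × Int)) : Int := PySem.Dict.getD (PySem.Dict.mk row) "model_year" 0

def summarize_inventory (rows : List (List (String × Int))) : List (String × Option Int) :=
  if rows = [] then
    [("total_records", some 0), ("distinct_years", some 0), ("year_start", none), ("year_end", none)]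
  else
    let years := PySem.List.sorted (PySem.Set.ofList (rows.map yearOf)) (fun y => y) false
    [("total_records", some (rows.length : Int)),
     ("distinct_years", some (years.length : Int)),
     ("year_start", some (PySem.List.pyGetD years 0 0)),
     ("year_end", some (PySem.List.pyGetD years (-1) 0))]

-- ===== PORT B =====
def bStep (st : List Int × Option Int × Option Int) (row : List (String × Int)) :
    List Int × Option Int × Option Int :=
  let y := yearOf row
  (PySem.Set.add st.1 y,
   (match st.2.1 with | none => some y | some m => some (if y < m then y else m)),
   (match st.2.2 with | none => some y | some m => some (if m < y then y else m)))

def summarize_inventory_alt (rows : List (List (String × Int))) : List (String × Option Int) :=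
  if rows = [] then
    [("total_records", some 0), ("distinct_years", some 0), ("year_start", none), ("year_end", none)]
  else
    let st := rows.foldl bStep ([], none, none)
    [("total_records", some (rows.length : Int)),
     ("distinct_years", some (st.1.length : Int)),
     ("year_start", st.2.1),
     ("year_end", st.2.2)]

-- ===== PRECONDITION & SPEC =====
-- Pre_ excludes exactly the rows on which Python raises KeyError: a row without the key "model_year".
def Pre_summarize_inventory (rows : List (List (String × Int))) : Prop :=
  rows.all (fun row => PySem.Dict.contains (PySem.Dict.mk row) "model_year") = true
instance (rows : List (List (String × Int))) : Decidable (Pre_summarize_inventory rows) := by unfold Pre_summarize_inventory; infer_instance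
def pvWitness_summarize_inventory : (List (List (String × Int))) := [[("model_year", 2019)], [("model_year", 2007), ("trim", 3)]]

def Spec_summarize_inventory (rows : List (List (String × Int))) (out : List (String × Option Int)) : Prop := out = summarize_inventory_alt rows
instance (rows : List (List (String × Int))) (out : List (String × Option Int)) : Decidable (Spec_summarize_inventory rows out) := by unfold Spec_summarize_inventory; infer_instance

-- ===== CLAIM (what is proved, stated in full; the proofs are below) =====
def Claim_equal_summarize_inventory : Prop := ∀ (rows : List (List (String × Int))), Dom_summarize_inventory rows → Pre_summarize_inventory rows → Spec_summarize_inventory rows (summarize_inventory rows)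

-- ===== LEMMAS AND PROOFS =====

-- B's triple fold is three independent folds
theorem bfold_split (rows : List (List (String × Int))) (s : List Int) (mn mx : Option Int) :
    rows.foldl bStep (s, mn, mx) =
      (rows.foldl (fun t r => PySem.Set.add t (yearOf r)) s,
       rows.foldl (fun o r => match o with | none => some (yearOf r) | some m => some (if yearOf r < m then yearOf r else m)) mn,
       rows.foldl (fun o r => match o with | none => some (yearOf r) | some m => some (if m < yearOf r then yearOf r else m)) mx) := by
  induction rows generalizing s mn mx with
  | nil => rfl
  | cons r t ih => simp [List.foldl, bStep, ih]

theorem optMin_fold (t : List Int) (y : Int) :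
    t.foldl (fun o x => match o with | none => some x | some m => some (if x < m then x else m)) (some y)
      = some (t.foldl min y) := by
  induction t generalizing y with
  | nil => rfl
  | cons x t ih =>
      simp only [List.foldl, ih]
      congr 2
      rw [min_def]
      split_ifs <;> omega

theorem optMax_fold (t : List Int) (y : Int) :
    t.foldl (fun o x => match o with | none => some x | some m => some (if m < x then x else m)) (some y)
      = some (t.foldl max y) := by
  induction t generalizing y with
  | nil => rfl
  | cons x t ih =>
      simp only [List.foldl, ih]
      congr 2
      rw [max_def]
      split_ifs <;> omega

theorem pairwise_le_getLast (L : List Int) (h : L ≠ []) (hp : L.Pairwise (· ≤ ·)) :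
    ∀ y ∈ L, y ≤ L.getLast h := by
  induction L with
  | nil => exact absurd rfl h
  | cons a t ih =>
      intro y hy
      rcases List.pairwise_cons.mp hp with ⟨ha, ht⟩
      cases t with
      | nil => simp at hy; simp [hy]
      | cons b t' =>
          have hne' : (b :: t' : List Int) ≠ [] := by simp
          rw [List.getLast_cons hne']
          rcases List.mem_cons.mp hy with rfl | hyt
          · exact ha _ (List.getLast_mem hne')
          · exact ih hne' ht _ hyt

theorem foldl_min_mem_cons (y : Int) (t : List Int) : t.foldl min y ∈ y :: t := by
  rcases PySem.List.foldl_min_mem t y with h | h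
  · rw [h]; simp
  · exact List.mem_cons_of_mem _ h

theorem foldl_max_mem_cons (y : Int) (t : List Int) : t.foldl max y ∈ y :: t := by
  rcases PySem.List.foldl_max_mem t y with h | h
  · rw [h]; simp
  · exact List.mem_cons_of_mem _ h

theorem foldl_min_le_mem (y : Int) (t : List Int) : ∀ z ∈ y :: t, t.foldl min y ≤ z := by
  intro z hz
  rcases List.mem_cons.mp hz with rfl | hzt
  · exact (PySem.List.foldl_min_le t z).1
  · exact (PySem.List.foldl_min_le t y).2 _ hzt

theorem le_foldl_max_mem (y : Int) (t : List Int) : ∀ z ∈ y :: t, z ≤ t.foldl max y := by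
  intro z hz
  rcases List.mem_cons.mp hz with rfl | hzt
  · exact (PySem.List.le_foldl_max t z).1
  · exact (PySem.List.le_foldl_max t y).2 _ hzt

theorem sorted_ofList_ne_nil (y : Int) (t : List Int) :
    PySem.List.sorted (PySem.Set.ofList (y :: t)) (fun x => x) false ≠ [] := by
  intro h
  rw [PySem.List.sorted_eq_nil_iff] at h
  have hmem : y ∈ PySem.Set.ofList (y :: t) := (PySem.Set.mem_ofList _ _).mpr (by simp)
  rw [h] at hmem
  simp at hmem

theorem sorted_head_eq_min (y : Int) (t : List Int) :
    PySem.List.pyGetD (PySem.List.sorted (PySem.Set.ofList (y :: t)) (fun x => x) false) 0 0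
      = t.foldl min y := by
  obtain ⟨a, u, hcons⟩ := List.exists_cons_of_ne_nil (sorted_ofList_ne_nil y t)
  rw [hcons, PySem.List.pyGetD_zero_cons]
  have haL : a ∈ PySem.List.sorted (PySem.Set.ofList (y :: t)) (fun x => x) false := by
    rw [hcons]; simp
  have hays : a ∈ y :: t :=
    (PySem.Set.mem_ofList _ _).mp ((PySem.List.mem_sorted _ _ _ _).mp haL)
  have h1 : a ≤ t.foldl min y :=
    PySem.List.key_head_sorted_le _ _ hcons _ ((PySem.Set.mem_ofList _ _).mpr (foldl_min_mem_cons y t))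
  have h2 : t.foldl min y ≤ a := foldl_min_le_mem y t a hays
  omega

theorem sorted_last_eq_max (y : Int) (t : List Int) :
    PySem.List.pyGetD (PySem.List.sorted (PySem.Set.ofList (y :: t)) (fun x => x) false) (-1) 0
      = t.foldl max y := by
  have hne := sorted_ofList_ne_nil y t
  rw [PySem.List.pyGetD_neg_one _ _ hne]
  have hp : (PySem.List.sorted (PySem.Set.ofList (y :: t)) (fun x => x) false).Pairwise (· ≤ ·) :=
    PySem.List.sorted_pairwise _ _
  have hlastys : (PySem.List.sorted (PySem.Set.ofList (y :: t)) (fun x => x) false).getLast hne ∈ y :: t :=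
    (PySem.Set.mem_ofList _ _).mp ((PySem.List.mem_sorted _ _ _ _).mp (List.getLast_mem hne))
  have hXL : t.foldl max y ∈ PySem.List.sorted (PySem.Set.ofList (y :: t)) (fun x => x) false := by
    rw [PySem.List.mem_sorted]
    exact (PySem.Set.mem_ofList _ _).mpr (foldl_max_mem_cons y t)
  have h1 := le_foldl_max_mem y t _ hlastys
  have h2 := pairwise_le_getLast _ hne hp _ hXL
  omega

-- core fact: on a nonempty rows list the two result quadruples agree
theorem main_eq (r : List (String × Int)) (rest : List (List (String × Int))) :
    summarize_inventory_alt (r :: rest) = summarize_inventory (r :: rest) := by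
  have hne : (r :: rest : List (List (String × Int))) ≠ [] := by simp
  have hmin : (r :: rest).foldl (fun o row => match o with | none => some (yearOf row) | some m => some (if yearOf row < m then yearOf row else m)) none
      = some ((rest.map yearOf).foldl min (yearOf r)) := by
    simp only [List.foldl]
    rw [← optMin_fold (rest.map yearOf) (yearOf r), List.foldl_map]
  have hmax : (r :: rest).foldl (fun o row => match o with | none => some (yearOf row) | some m => some (if m < yearOf row then yearOf row else m)) none
      = some ((rest.map yearOf).foldl max (yearOf r)) := by
    simp only [List.foldl]
    rw [← optMax_fold (rest.map yearOf) (yearOf r), List.foldl_map]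
  have hset : (r :: rest).foldl (fun t row => PySem.Set.add t (yearOf row)) ([] : List Int) =
      PySem.Set.ofList ((r :: rest).map yearOf) := by
    rw [PySem.Set.ofList_eq_foldl, List.foldl_map]
  unfold summarize_inventory summarize_inventory_alt
  rw [if_neg hne, if_neg hne]
  rw [bfold_split, hmin, hmax, hset]
  simp only [List.map_cons]
  rw [sorted_head_eq_min, sorted_last_eq_max, PySem.List.length_sorted]

-- ===== VERDICT (by name: the statement is the Claim_ definition above) =====
theorem summarize_inventory_spec : Claim_equal_summarize_inventory := by
  intro rows _ _
  unfold Spec_summarize_inventory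
  cases rows with
  | nil => rfl
  | cons r rest => exact (main_eq r rest).symm
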